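-- pv_equiv track=rewrite | github.com/psychopatz/ModManager | DynamicTradingManager/backend/Simulation/sim/tag_logic.py | matches_all_tags
-- ===== SOURCE A (Python) =====
-- from typing import Iterable, Sequence
--
-- def _tag_candidates(item_tag: str) -> list[str]:
--     if not item_tag:
--         return []
--
--     out: list[str] = []
--     seen: set[str] = set()
--
--     probe = item_tag
--     while probe:
--         if probe not in seen:
--             out.append(probe)
--             seen.add(probe)
--         if "." not in probe:
--             break
--         probe = probe.rsplit(".", 1)[0]
--
--     parts = [part for part in item_tag.split(".") if part]
--     for part in reversed(parts):
--         if part not in seen: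
--             out.append(part)
--             seen.add(part)
--
--     return out
--
-- def tag_matches(item_tag: str, query_tag: str) -> bool:
--     if not item_tag or not query_tag:
--         return False
--     if item_tag == query_tag or item_tag.startswith(query_tag + "."):
--         return True
--     return query_tag in _tag_candidates(item_tag)
--
-- def matches_all_tags(item_tags: Sequence[str], required_tags: Sequence[str]) -> bool:
--     if not required_tags:
--         return False
--     for req in required_tags:
--         matched = False
--         for item_tag in item_tags:
--             if tag_matches(item_tag, req):
--                 matched = True
--                 break
--         if not matched:
--             return False
--     return True
-- ===== SOURCE B (Python) =====
-- from typing import Sequence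
--
--
-- def tag_matches(item_tag: str, query_tag: str) -> bool:
--     return bool(item_tag) and bool(query_tag) and (
--         item_tag == query_tag
--         or item_tag.startswith(query_tag + ".")
--         or query_tag in item_tag.split(".")
--     )
--
--
-- def matches_all_tags(item_tags: Sequence[str], required_tags: Sequence[str]) -> bool:
--     return bool(required_tags) and all(
--         any(tag_matches(item_tag, req) for item_tag in item_tags)
--         for req in required_tags
--     )
-- ===== Notes on version B (the rewrite author's own statement) =====
-- stated objective: simpler
-- what changed: The candidate-list machinery (while-loop prefix walk, dedup set, reversed component pass) is replaced by a direct three-way string test per pair — equality, dotted-prefix startswith, or membership in split('.') — since every prefix candidate is already covered by the equality/startswith checks.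
import Mathlib
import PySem

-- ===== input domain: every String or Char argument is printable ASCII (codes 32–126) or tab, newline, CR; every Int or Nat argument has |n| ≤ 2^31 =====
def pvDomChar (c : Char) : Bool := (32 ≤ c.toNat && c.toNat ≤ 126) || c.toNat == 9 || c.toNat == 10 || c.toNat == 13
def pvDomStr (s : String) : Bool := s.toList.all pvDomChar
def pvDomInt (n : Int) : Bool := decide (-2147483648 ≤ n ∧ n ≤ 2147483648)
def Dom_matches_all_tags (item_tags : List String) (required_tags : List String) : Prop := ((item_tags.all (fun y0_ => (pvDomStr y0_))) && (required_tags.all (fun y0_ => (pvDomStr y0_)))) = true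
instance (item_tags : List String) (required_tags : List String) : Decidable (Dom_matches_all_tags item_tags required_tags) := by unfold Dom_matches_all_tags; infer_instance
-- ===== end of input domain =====

-- B replaces A's candidate-list machinery (while-loop prefix walk + dedup set + reversed parts)
-- by a direct per-pair test: equality, dotted-prefix startswith, or membership in split('.') (objective: simpler).

-- ===== PORT A =====

-- probe.rsplit(".", 1)[0] for a probe containing '.': everything before the LAST '.' (hand-ported; exact on such probes)
def pvRsplitHead (s : List Char) : List Char := ((s.reverse.dropWhile (· ≠ '.')).tail).reverse

theorem pvRsplitHead_length_lt {s : List Char} (h : '.' ∈ s) :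
    (pvRsplitHead s).length < s.length := by
  have hs : s ≠ [] := by rintro rfl; simp at h
  have h1 : (s.reverse.dropWhile (· ≠ '.')).length ≤ s.length := by
    simpa using List.length_dropWhile_le (p := (· ≠ '.')) (l := s.reverse)
  have h0 : 0 < s.length := List.length_pos_of_ne_nil hs
  simp only [pvRsplitHead, List.length_reverse, List.length_tail]
  omega

-- the 'while probe:' loop of _tag_candidates, carrying (out, seen)
def pvCandLoop (probe : List Char) (out : List (List Char)) (seen : PySem.Set (List Char)) :
    List (List Char) × PySem.Set (List Char) :=
  if probe = [] then (out, seen)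
  else
    let st := if PySem.Set.contains seen probe then (out, seen)
              else (out ++ [probe], PySem.Set.add seen probe)
    if h : '.' ∈ probe then pvCandLoop (pvRsplitHead probe) st.1 st.2
    else st
termination_by probe.length
decreasing_by exact pvRsplitHead_length_lt h

-- the 'for part in reversed(parts):' loop of _tag_candidates
def pvPartsLoop (parts : List (List Char)) (out : List (List Char))
    (seen : PySem.Set (List Char)) : List (List Char) :=
  match parts with
  | [] => out
  | p :: rest =>
      if PySem.Set.contains seen p then pvPartsLoop rest out seen
      else pvPartsLoop rest (out ++ [p]) (PySem.Set.add seen p)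

def pvTagCandidates (s : List Char) : List (List Char) :=
  if s = [] then []
  else
    let st := pvCandLoop s [] PySem.Set.empty
    let parts := (PySem.Chars.splitOn s ['.']).filter (fun p => decide (p ≠ []))
    pvPartsLoop parts.reverse st.1 st.2

def pvTagMatches (item q : List Char) : Bool :=
  if item = [] ∨ q = [] then false
  else if item == q || PySem.Chars.startswith item (q ++ ['.']) then true
  else (pvTagCandidates item).contains q

-- inner 'for item_tag in item_tags: … break' loop
def pvAnyMatch (item_tags : List (List Char)) (req : List Char) : Bool :=
  match item_tags with
  | [] => false
  | it :: rest => if pvTagMatches it req then true else pvAnyMatch rest req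

-- outer 'for req in required_tags: … return False' loop
def pvAllReq (item_tags : List (List Char)) (reqs : List (List Char)) : Bool :=
  match reqs with
  | [] => true
  | r :: rest => if pvAnyMatch item_tags r then pvAllReq item_tags rest else false

def matches_all_tags (item_tags : List String) (required_tags : List String) : Bool :=
  if required_tags = [] then false
  else pvAllReq (item_tags.map String.toList) (required_tags.map String.toList)

-- ===== PORT B =====

def pvTagMatchesAlt (item q : List Char) : Bool :=
  !item.isEmpty && !q.isEmpty &&
    (item == q || PySem.Chars.startswith item (q ++ ['.']) ||
      (PySem.Chars.splitOn item ['.']).contains q)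

def matches_all_tags_alt (item_tags : List String) (required_tags : List String) : Bool :=
  !required_tags.isEmpty &&
    required_tags.all (fun req => item_tags.any (fun it => pvTagMatchesAlt it.toList req.toList))

-- ===== PRECONDITION & SPEC =====
def Spec_matches_all_tags (item_tags : List String) (required_tags : List String) (out : Bool) : Prop := out = matches_all_tags_alt item_tags required_tags
instance (item_tags : List String) (required_tags : List String) (out : Bool) : Decidable (Spec_matches_all_tags item_tags required_tags out) := by unfold Spec_matches_all_tags; infer_instance

-- ===== CLAIM (what is proved, stated in full; the proofs are below) =====
def Claim_equal_matches_all_tags : Prop := ∀ (item_tags : List String) (required_tags : List String), Dom_matches_all_tags item_tags required_tags → Spec_matches_all_tags item_tags required_tags (matches_all_tags item_tags required_tags)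

-- ===== LEMMAS AND PROOFS =====

-- the prefix chain the while-loop visits: s, then everything before each '.' from the right
def pvChain (s : List Char) : List (List Char) :=
  if s = [] then []
  else s :: (if h : '.' ∈ s then pvChain (pvRsplitHead s) else [])
termination_by s.length
decreasing_by exact pvRsplitHead_length_lt h

theorem pvRsplitHead_spec {s : List Char} (h : '.' ∈ s) :
    ∃ t, s = pvRsplitHead s ++ '.' :: t := by
  have hne : s.reverse.dropWhile (· ≠ '.') ≠ [] := by
    simp only [ne_eq, List.dropWhile_eq_nil_iff, not_forall]
    exact ⟨'.', by simpa using h, by simp⟩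
  obtain ⟨a, as, hd⟩ := List.exists_cons_of_ne_nil hne
  have ha : a = '.' := by
    have h2 := List.head_dropWhile_not (fun x => decide (x ≠ '.')) (l := s.reverse) hne
    have h4 : (s.reverse.dropWhile (fun x => decide (x ≠ '.'))).head? = some a := by
      rw [hd]; rfl
    have h5 := List.head?_eq_some_head (l := s.reverse.dropWhile (fun x => decide (x ≠ '.'))) hne
    rw [h4] at h5
    have h6 : a = (s.reverse.dropWhile (fun x => decide (x ≠ '.'))).head hne :=
      Option.some.inj h5
    rw [h6]
    simpa using h2
  have hr : pvRsplitHead s = as.reverse := by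
    rw [pvRsplitHead, hd, List.tail_cons]
  refine ⟨(s.reverse.takeWhile (· ≠ '.')).reverse, ?_⟩
  have hsplit : s.reverse = s.reverse.takeWhile (· ≠ '.') ++ a :: as := by
    rw [← hd, List.takeWhile_append_dropWhile]
  calc s = (s.reverse).reverse := by simp
    _ = (s.reverse.takeWhile (· ≠ '.') ++ a :: as).reverse := by rw [← hsplit]
    _ = pvRsplitHead s ++ '.' :: (s.reverse.takeWhile (· ≠ '.')).reverse := by
          rw [hr, ha]; simp [List.reverse_append]

theorem mem_pvChain : ∀ (s q : List Char), q ∈ pvChain s → q = s ∨ (q ++ ['.']) <+: s := by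
  intro s
  induction s using pvChain.induct with
  | case1 =>
      intro q hq
      rw [pvChain] at hq
      simp at hq
  | case2 s hnil ih =>
      intro q hq
      rw [pvChain, if_neg hnil] at hq
      by_cases hdot : '.' ∈ s
      · rw [dif_pos hdot] at hq
        rcases List.mem_cons.mp hq with rfl | hq'
        · exact Or.inl rfl
        · obtain ⟨t, ht⟩ := pvRsplitHead_spec hdot
          rcases ih hdot q hq' with rfl | hpre
          · refine Or.inr ⟨t, ?_⟩
            rw [List.append_assoc, List.singleton_append]
            exact ht.symm
          · exact Or.inr (hpre.trans ⟨'.' :: t, ht.symm⟩)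
      · rw [dif_neg hdot] at hq
        rcases List.mem_cons.mp hq with rfl | hq'
        · exact Or.inl rfl
        · simp at hq'

theorem pvCandLoop_mem : ∀ (probe : List Char) (out : List (List Char)) (seen : PySem.Set (List Char)),
    (∀ y, y ∈ seen ↔ y ∈ out) →
    (∀ y, y ∈ (pvCandLoop probe out seen).1 ↔ y ∈ out ∨ y ∈ pvChain probe) ∧
    (∀ y, y ∈ (pvCandLoop probe out seen).2 ↔ y ∈ (pvCandLoop probe out seen).1) := by
  intro probe out seen
  induction probe, out, seen using pvCandLoop.induct with
  | case1 out seen =>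
      intro hInv
      rw [pvCandLoop]
      exact ⟨fun y => by simp [pvChain], fun y => by simpa using hInv y⟩
  | case2 probe out seen hnil st hdot ih =>
      intro hInv
      have hst : st = if PySem.Set.contains seen probe then (out, seen)
          else (out ++ [probe], PySem.Set.add seen probe) := rfl
      have hres : pvCandLoop probe out seen = pvCandLoop (pvRsplitHead probe) st.1 st.2 := by
        rw [pvCandLoop, if_neg hnil]
        rw [dif_pos hdot]
        rfl
      have hch : pvChain probe = probe :: pvChain (pvRsplitHead probe) := by
        rw [pvChain, if_neg hnil, dif_pos hdot]
      have hImem : ∀ y, y ∈ st.1 ↔ y ∈ out ∨ y = probe := by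
        intro y
        by_cases hc : PySem.Set.contains seen probe = true
        · rw [if_pos hc] at hst
          rw [hst]
          have hp : probe ∈ seen := List.contains_iff_mem.mp hc
          refine ⟨Or.inl, fun hcase => ?_⟩
          rcases hcase with hy | rfl
          · exact hy
          · exact (hInv _).mp hp
        · rw [if_neg hc] at hst
          rw [hst]
          simp
      have hInv2 : ∀ y, y ∈ st.2 ↔ y ∈ st.1 := by
        intro y
        by_cases hc : PySem.Set.contains seen probe = true
        · rw [if_pos hc] at hst
          rw [hst]
          exact hInv y
        · rw [if_neg hc] at hst
          rw [hst]
          simp only [PySem.Set.mem_add, List.mem_append, List.mem_singleton, hInv y]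
      obtain ⟨ih1, ih2⟩ := ih hInv2
      rw [hres, hch]
      refine ⟨fun y => ?_, ih2⟩
      rw [ih1 y]
      have : y ∈ st.1 ↔ y ∈ out ∨ y = probe := hImem y
      rw [this]
      simp only [List.mem_cons]
      tauto
  | case3 probe out seen hnil hdot =>
      intro hInv
      have hres : pvCandLoop probe out seen = if PySem.Set.contains seen probe then (out, seen)
          else (out ++ [probe], PySem.Set.add seen probe) := by
        rw [pvCandLoop, if_neg hnil]
        rw [dif_neg hdot]
      have hch : pvChain probe = [probe] := by
        rw [pvChain, if_neg hnil, dif_neg hdot]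
      by_cases hc : PySem.Set.contains seen probe = true
      · rw [if_pos hc] at hres
        have hp : probe ∈ seen := List.contains_iff_mem.mp hc
        rw [hres, hch]
        refine ⟨fun y => ?_, fun y => hInv y⟩
        simp only [List.mem_singleton]
        refine ⟨Or.inl, fun hcase => ?_⟩
        rcases hcase with hy | rfl
        · exact hy
        · exact (hInv _).mp hp
      · rw [if_neg hc] at hres
        rw [hres, hch]
        refine ⟨fun y => by simp, fun y => ?_⟩
        simp only [PySem.Set.mem_add, List.mem_append, List.mem_singleton, hInv y]

theorem pvPartsLoop_mem : ∀ (parts : List (List Char)) (out : List (List Char))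
    (seen : PySem.Set (List Char)), (∀ y, y ∈ seen ↔ y ∈ out) →
    ∀ y, y ∈ pvPartsLoop parts out seen ↔ y ∈ out ∨ y ∈ parts := by
  intro parts
  induction parts with
  | nil => intro out seen _ y; simp [pvPartsLoop]
  | cons p rest ih =>
      intro out seen hInv y
      by_cases hc : PySem.Set.contains seen p
      · have hp : p ∈ seen := by simpa using (List.contains_iff_mem).mp hc
        rw [pvPartsLoop, if_pos hc, ih out seen hInv y]
        simp only [List.mem_cons]
        constructor
        · tauto
        · rintro (h | rfl | h)
          · exact Or.inl h
          · exact Or.inl ((hInv y).mp hp)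
          · exact Or.inr h
      · have hInv' : ∀ z, z ∈ PySem.Set.add seen p ↔ z ∈ out ++ [p] := by
          intro z
          simp only [PySem.Set.mem_add, List.mem_append, List.mem_singleton, hInv z]
        rw [pvPartsLoop, if_neg hc, ih _ _ hInv' y]
        simp only [List.mem_append, List.mem_cons]
        tauto

theorem mem_pvTagCandidates {s q : List Char} (hs : s ≠ []) :
    q ∈ pvTagCandidates s ↔ q ∈ pvChain s ∨ (q ≠ [] ∧ q ∈ PySem.Chars.splitOn s ['.']) := by
  rw [pvTagCandidates, if_neg hs]
  have hEmpty : ∀ y : List Char, y ∈ (PySem.Set.empty : PySem.Set (List Char)) ↔ y ∈ ([] : List (List Char)) := by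
    intro y; simp [PySem.Set.empty]
  obtain ⟨h1, h2⟩ := pvCandLoop_mem s [] PySem.Set.empty hEmpty
  have hInv : ∀ y, y ∈ (pvCandLoop s [] PySem.Set.empty).2 ↔ y ∈ (pvCandLoop s [] PySem.Set.empty).1 := h2
  rw [pvPartsLoop_mem _ _ _ hInv q, h1 q]
  simp only [List.not_mem_nil, false_or, List.mem_reverse, List.mem_filter, decide_eq_true_eq, ne_eq]
  tauto

theorem tagMatches_eq (item q : List Char) : pvTagMatches item q = pvTagMatchesAlt item q := by
  by_cases hi : item = []
  · simp [pvTagMatches, pvTagMatchesAlt, hi]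
  by_cases hq : q = []
  · simp [pvTagMatches, pvTagMatchesAlt, hi, hq]
  rw [pvTagMatches, if_neg (by tauto)]
  by_cases hb : (item == q || PySem.Chars.startswith item (q ++ ['.'])) = true
  · rw [if_pos hb]
    rcases Bool.or_eq_true_iff.mp hb with h | h
    · simp [pvTagMatchesAlt, hi, hq, h]
    · simp [pvTagMatchesAlt, hi, hq, h]
  · rw [if_neg hb]
    have hne : item ≠ q := by
      intro h; exact hb (by simp [h])
    have hnpre : ¬ (q ++ ['.']) <+: item := by
      intro h
      exact hb (by simp [(PySem.Chars.startswith_iff item (q ++ ['.'])).mpr h])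
    have heq : (item == q) = false := by simpa using hne
    have hsw : PySem.Chars.startswith item (q ++ ['.']) = false := by
      rw [Bool.eq_false_iff]
      intro h
      exact hnpre ((PySem.Chars.startswith_iff item (q ++ ['.'])).mp h)
    rw [pvTagMatchesAlt]
    have h1 : (!item.isEmpty) = true := by simp [hi]
    have h2 : (!q.isEmpty) = true := by simp [hq]
    rw [h1, h2, heq, hsw]
    simp only [Bool.true_and, Bool.false_or]
    rw [Bool.eq_iff_iff]
    simp only [List.contains_iff_mem]
    rw [mem_pvTagCandidates hi]
    constructor
    · rintro (hch | ⟨_, hsp⟩)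
      · rcases mem_pvChain item q hch with rfl | hpre
        · exact absurd rfl hne
        · exact absurd hpre hnpre
      · exact hsp
    · intro hsp
      exact Or.inr ⟨hq, hsp⟩

theorem anyMatch_eq (its : List (List Char)) (r : List Char) :
    pvAnyMatch its r = its.any (fun it => pvTagMatchesAlt it r) := by
  induction its with
  | nil => rfl
  | cons it rest ih =>
      rw [pvAnyMatch, List.any_cons, ← ih, tagMatches_eq]
      by_cases h : pvTagMatchesAlt it r <;> simp [h]

theorem allReq_eq (its : List (List Char)) (reqs : List (List Char)) :
    pvAllReq its reqs = reqs.all (fun r => its.any (fun it => pvTagMatchesAlt it r)) := by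
  induction reqs with
  | nil => rfl
  | cons r rest ih =>
      rw [pvAllReq, List.all_cons, ← ih, anyMatch_eq]
      by_cases h : its.any (fun it => pvTagMatchesAlt it r) <;> simp [h]

theorem matches_eq (its reqs : List String) :
    matches_all_tags its reqs = matches_all_tags_alt its reqs := by
  cases reqs with
  | nil => rfl
  | cons r rs =>
      rw [matches_all_tags, if_neg (List.cons_ne_nil r rs), allReq_eq, matches_all_tags_alt]
      simp [List.all_map, List.any_map, Function.comp_def]

-- ===== VERDICT (by name: the statement is the Claim_ definition above) =====
theorem matches_all_tags_spec : Claim_equal_matches_all_tags := by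
  intro its reqs _
  unfold Spec_matches_all_tags
  exact matches_eq its reqs
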